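-- pv_equiv track=rewrite | github.com/mstoycs/Deal-Desk-Expansion-Store-Evaluation-Bot | expansion_store_evaluator.py | _determine_product_category
-- ===== SOURCE A (Python) =====
-- def _determine_product_category(product_name: str) -> str:
--     """Determine product category from name"""
--     name_lower = product_name.lower()
--
--     if any(word in name_lower for word in ['bike', 'bicycle']):
--         return 'bike'
--     elif any(word in name_lower for word in ['scooter']):
--         return 'scooter'
--     elif any(word in name_lower for word in ['skateboard', 'board', 'onewheel']):
--         return 'board'
--     elif any(word in name_lower for word in ['helmet', 'protection']):
--         return 'safety'
--     elif any(word in name_lower for word in ['tire', 'wheel', 'brake', 'battery', 'motor', 'controller']):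
--         return 'parts'
--     else:
--         return 'accessory'
-- ===== SOURCE B (Python) =====
-- # B: single left-to-right scan of the lowercased name; at each position every
-- # keyword that starts there lowers a running minimum category rank; the final
-- # minimum picks the category (5 = no match = accessory).
-- _KEYWORD_RANK = {
--     'bike': 0, 'bicycle': 0,
--     'scooter': 1,
--     'skateboard': 2, 'board': 2, 'onewheel': 2,
--     'helmet': 3, 'protection': 3,
--     'tire': 4, 'wheel': 4, 'brake': 4, 'battery': 4, 'motor': 4, 'controller': 4,
-- }
-- _CATEGORIES = ['bike', 'scooter', 'board', 'safety', 'parts', 'accessory']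
--
-- def _determine_product_category(product_name: str) -> str:
--     s = product_name.lower()
--     best = 5
--     for i in range(len(s)):
--         for kw, rank in _KEYWORD_RANK.items():
--             if s.startswith(kw, i):
--                 best = min(best, rank)
--     return _CATEGORIES[best]
-- ===== Notes on version B (the rewrite author's own statement) =====
-- stated objective: alternative
-- what changed: Instead of A's if/elif chain of whole-string substring tests per category, B makes one left-to-right scan over the positions of the lowercased name, lowering a running minimum category rank whenever a keyword starts at the current position, and indexes a category list by the final minimum.
import Mathlib
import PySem

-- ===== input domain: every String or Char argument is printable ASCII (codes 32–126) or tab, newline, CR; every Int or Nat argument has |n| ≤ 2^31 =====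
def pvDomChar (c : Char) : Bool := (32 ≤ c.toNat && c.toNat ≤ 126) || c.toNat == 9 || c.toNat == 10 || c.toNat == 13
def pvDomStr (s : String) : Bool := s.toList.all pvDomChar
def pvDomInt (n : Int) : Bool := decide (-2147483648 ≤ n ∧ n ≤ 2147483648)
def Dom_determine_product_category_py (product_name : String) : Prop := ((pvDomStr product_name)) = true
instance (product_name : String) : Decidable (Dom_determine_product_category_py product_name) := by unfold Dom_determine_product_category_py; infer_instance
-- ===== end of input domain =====

-- B replaces A's if/elif chain of whole-string substring tests with a single positional
-- scan of the lowercased name keeping a running minimum category rank (objective: alternative).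


-- ===== PORT A =====
-- literal transliteration of A: lowercase once, then an if/elif chain of 'any' substring tests
def determine_product_category_py (product_name : String) : String :=
  let name_lower := PySem.Str.lower product_name
  if (["bike", "bicycle"].any (fun word => PySem.Str.isIn word name_lower)) then "bike"
  else if (["scooter"].any (fun word => PySem.Str.isIn word name_lower)) then "scooter"
  else if (["skateboard", "board", "onewheel"].any (fun word => PySem.Str.isIn word name_lower)) then "board"
  else if (["helmet", "protection"].any (fun word => PySem.Str.isIn word name_lower)) then "safety"
  else if (["tire", "wheel", "brake", "battery", "motor", "controller"].any (fun word => PySem.Str.isIn word name_lower)) then "parts"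
  else "accessory"

-- ===== PORT B =====
-- B's keyword → rank dict, as an association list in insertion order
def pvKwRank : List (String × Nat) :=
  [("bike", 0), ("bicycle", 0),
   ("scooter", 1),
   ("skateboard", 2), ("board", 2), ("onewheel", 2),
   ("helmet", 3), ("protection", 3),
   ("tire", 4), ("wheel", 4), ("brake", 4), ("battery", 4), ("motor", 4), ("controller", 4)]

def pvCategories : List String := ["bike", "scooter", "board", "safety", "parts", "accessory"]

-- transliteration of B: 'for i in range(len(s))' ported as a fold over List.range (exact: the
-- loop visits 0,…,len-1); s.startswith(kw, i) is exactly a prefix test at position i, ported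
-- as Chars.startswith on toList.drop i (exact); the final
-- list index _CATEGORIES[best] is exact as getD since best ≤ 5 by construction.
def determine_product_category_py_alt (product_name : String) : String :=
  let s := (PySem.Str.lower product_name).toList
  let best := (List.range s.length).foldl
    (fun best i =>
      pvKwRank.foldl
        (fun best e =>
          if PySem.Chars.startswith (s.drop i) e.1.toList then min best e.2 else best)
        best)
    5
  pvCategories.getD best "accessory"

-- ===== PRECONDITION & SPEC =====
def Spec_determine_product_category_py (product_name : String) (out : String) : Prop := out = determine_product_category_py_alt product_name
instance (product_name : String) (out : String) : Decidable (Spec_determine_product_category_py product_name out) := by unfold Spec_determine_product_category_py; infer_instance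

-- ===== CLAIM (what is proved, stated in full; the proofs are below) =====
def Claim_equal_determine_product_category_py : Prop := ∀ (product_name : String), Dom_determine_product_category_py product_name → Spec_determine_product_category_py product_name (determine_product_category_py product_name)

-- ===== LEMMAS AND PROOFS =====

-- the multiset of ranks hit anywhere in B's scan
def pvHits (t : List Char) : List Nat :=
  (List.range t.length).flatMap
    (fun i => pvKwRank.filterMap
      (fun e => if PySem.Chars.startswith (t.drop i) e.1.toList then some e.2 else none))

-- group boolean: some keyword of the list occurs in t
def pvG (t : List Char) (ws : List String) : Bool := ws.any (fun w => PySem.Chars.isIn w.toList t)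

theorem pv_inner_eq (l : List (String × Nat)) (c : String × Nat → Bool) (b : Nat) :
    l.foldl (fun b e => if c e then min b e.2 else b) b
      = List.foldl min b (l.filterMap (fun e => if c e then some e.2 else none)) := by
  induction l generalizing b with
  | nil => simp
  | cons hd tl ih => cases h : c hd <;> simp [h, ih]

theorem pv_double (t : List Char) (l : List Nat) (b : Nat) :
    l.foldl
      (fun best i =>
        pvKwRank.foldl
          (fun best e =>
            if PySem.Chars.startswith (t.drop i) e.1.toList then min best e.2 else best)
          best)
      b
      = List.foldl min b
          (l.flatMap (fun i => pvKwRank.filterMap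
            (fun e => if PySem.Chars.startswith (t.drop i) e.1.toList then some e.2 else none))) := by
  induction l generalizing b with
  | nil => simp
  | cons hd tl ih =>
    simp only [List.foldl_cons, List.flatMap_cons, List.foldl_append]
    rw [pv_inner_eq]; exact ih _

theorem pv_fold_min_le_init (l : List Nat) (b : Nat) : List.foldl min b l ≤ b := by
  induction l generalizing b with
  | nil => simp
  | cons hd tl ih => exact le_trans (ih _) (min_le_left _ _)

theorem pv_fold_min_le (l : List Nat) (b x : Nat) (hx : x ∈ l) : List.foldl min b l ≤ x := by
  induction l generalizing b with
  | nil => simp at hx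
  | cons hd tl ih =>
    rcases List.mem_cons.mp hx with h | h
    · subst h
      exact le_trans (pv_fold_min_le_init tl (min b x)) (min_le_right _ _)
    · exact ih (min b hd) h

theorem pv_le_fold_min (l : List Nat) (b c : Nat) (hb : c ≤ b) (h : ∀ x ∈ l, c ≤ x) :
    c ≤ List.foldl min b l := by
  induction l generalizing b with
  | nil => simpa
  | cons hd tl ih =>
    exact ih (min b hd) (le_min hb (h hd (by simp))) (fun x hx => h x (by simp [hx]))

theorem pv_sw_isIn (t : List Char) (i : Nat) (kw : List Char)
    (h : PySem.Chars.startswith (t.drop i) kw = true) : PySem.Chars.isIn kw t = true :=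
  (PySem.Chars.exists_prefix_drop_iff_isIn kw t).mp ⟨i, (PySem.Chars.startswith_iff _ _).mp h⟩

theorem pv_mem_hits (t : List Char) (x : Nat) (hx : x ∈ pvHits t) :
    (x = 0 ∧ pvG t ["bike", "bicycle"] = true) ∨
    (x = 1 ∧ pvG t ["scooter"] = true) ∨
    (x = 2 ∧ pvG t ["skateboard", "board", "onewheel"] = true) ∨
    (x = 3 ∧ pvG t ["helmet", "protection"] = true) ∨
    (x = 4 ∧ pvG t ["tire", "wheel", "brake", "battery", "motor", "controller"] = true) := by
  simp only [pvHits, List.mem_flatMap, List.mem_filterMap] at hx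
  obtain ⟨i, _, e, he, hif⟩ := hx
  split at hif
  case isFalse => simp at hif
  case isTrue hsw =>
    have hin := pv_sw_isIn t i e.1.toList hsw
    obtain rfl := Option.some.inj hif
    simp only [pvKwRank, List.mem_cons, List.not_mem_nil, or_false] at he
    rcases he with rfl|rfl|rfl|rfl|rfl|rfl|rfl|rfl|rfl|rfl|rfl|rfl|rfl|rfl <;>
      simp_all [pvG]

theorem pv_isIn_mem (t : List Char) (kw : String) (r : Nat)
    (he : (kw, r) ∈ pvKwRank) (hne : kw.toList ≠ [])
    (h : PySem.Chars.isIn kw.toList t = true) : r ∈ pvHits t := by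
  obtain ⟨j, hpre⟩ := (PySem.Chars.exists_prefix_drop_iff_isIn kw.toList t).mpr h
  have hj : j < t.length := by
    by_contra hge
    rw [List.drop_eq_nil_of_le (by omega)] at hpre
    exact hne (List.prefix_nil.mp hpre)
  simp only [pvHits, List.mem_flatMap, List.mem_filterMap]
  exact ⟨j, List.mem_range.mpr hj, (kw, r), he,
    by simp [(PySem.Chars.startswith_iff _ _).mpr hpre]⟩

theorem pvG_eq (u : String) (ws : List String) :
    pvG u.toList ws = ws.any (fun word => PySem.Str.isIn word u) := by
  simp [pvG, PySem.Str.isIn_eq]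

theorem pv_alt_eq (p : String) :
    determine_product_category_py_alt p
      = pvCategories.getD
          (List.foldl min 5 (pvHits ((PySem.Str.lower p).toList))) "accessory" := by
  show pvCategories.getD
      ((List.range (PySem.Str.lower p).toList.length).foldl
        (fun best i =>
          pvKwRank.foldl
            (fun best e =>
              if PySem.Chars.startswith (((PySem.Str.lower p).toList).drop i) e.1.toList then min best e.2 else best)
            best)
        5) "accessory" = _
  rw [pv_double]
  rfl

theorem pv_A_eq (p : String) :
    determine_product_category_py p
      = (let u := PySem.Str.lower p
         if (["bike", "bicycle"].any (fun word => PySem.Str.isIn word u)) then "bike"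
         else if (["scooter"].any (fun word => PySem.Str.isIn word u)) then "scooter"
         else if (["skateboard", "board", "onewheel"].any (fun word => PySem.Str.isIn word u)) then "board"
         else if (["helmet", "protection"].any (fun word => PySem.Str.isIn word u)) then "safety"
         else if (["tire", "wheel", "brake", "battery", "motor", "controller"].any (fun word => PySem.Str.isIn word u)) then "parts"
         else "accessory") := rfl

theorem pv_key (u : String) :
    (if (["bike", "bicycle"].any (fun word => PySem.Str.isIn word u)) then "bike"
     else if (["scooter"].any (fun word => PySem.Str.isIn word u)) then "scooter"
     else if (["skateboard", "board", "onewheel"].any (fun word => PySem.Str.isIn word u)) then "board"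
     else if (["helmet", "protection"].any (fun word => PySem.Str.isIn word u)) then "safety"
     else if (["tire", "wheel", "brake", "battery", "motor", "controller"].any (fun word => PySem.Str.isIn word u)) then "parts"
     else "accessory")
      = pvCategories.getD (List.foldl min 5 (pvHits u.toList)) "accessory" := by
  by_cases h0 : (["bike", "bicycle"].any (fun word => PySem.Str.isIn word u)) = true
  · have hbk : PySem.Chars.isIn "bike".toList u.toList = true ∨
        PySem.Chars.isIn "bicycle".toList u.toList = true := by
      simpa [PySem.Str.isIn_eq] using h0
    have hmem : (0 : Nat) ∈ pvHits u.toList := by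
      rcases hbk with h | h
      · exact pv_isIn_mem u.toList "bike" 0 (by simp [pvKwRank]) (by simp) h
      · exact pv_isIn_mem u.toList "bicycle" 0 (by simp [pvKwRank]) (by simp) h
    have hv : List.foldl min 5 (pvHits u.toList) = 0 :=
      Nat.le_zero.mp (pv_fold_min_le _ 5 0 hmem)
    rw [if_pos h0, hv]; rfl
  · by_cases h1 : (["scooter"].any (fun word => PySem.Str.isIn word u)) = true
    · have hs : PySem.Chars.isIn "scooter".toList u.toList = true := by
        simpa [PySem.Str.isIn_eq] using h1
      have hmem : (1 : Nat) ∈ pvHits u.toList :=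
        pv_isIn_mem u.toList "scooter" 1 (by simp [pvKwRank]) (by simp) hs
      have hge : 1 ≤ List.foldl min 5 (pvHits u.toList) :=
        pv_le_fold_min _ 5 1 (by omega) (fun x hx => by
          rcases pv_mem_hits u.toList x hx with ⟨rfl, hg⟩ | ⟨rfl, hg⟩ | ⟨rfl, hg⟩ | ⟨rfl, hg⟩ | ⟨rfl, hg⟩ <;>
            rw [pvG_eq] at hg <;> first | omega | exact absurd hg h0)
      have hv : List.foldl min 5 (pvHits u.toList) = 1 :=
        le_antisymm (pv_fold_min_le _ 5 1 hmem) hge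
      rw [if_neg h0, if_pos h1, hv]; rfl
    · by_cases h2 : (["skateboard", "board", "onewheel"].any (fun word => PySem.Str.isIn word u)) = true
      · have hb : PySem.Chars.isIn "skateboard".toList u.toList = true ∨
            PySem.Chars.isIn "board".toList u.toList = true ∨
            PySem.Chars.isIn "onewheel".toList u.toList = true := by
          simpa [PySem.Str.isIn_eq] using h2
        have hmem : (2 : Nat) ∈ pvHits u.toList := by
          rcases hb with h | h | h
          · exact pv_isIn_mem u.toList "skateboard" 2 (by simp [pvKwRank]) (by simp) h
          · exact pv_isIn_mem u.toList "board" 2 (by simp [pvKwRank]) (by simp) h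
          · exact pv_isIn_mem u.toList "onewheel" 2 (by simp [pvKwRank]) (by simp) h
        have hge : 2 ≤ List.foldl min 5 (pvHits u.toList) :=
          pv_le_fold_min _ 5 2 (by omega) (fun x hx => by
            rcases pv_mem_hits u.toList x hx with ⟨rfl, hg⟩ | ⟨rfl, hg⟩ | ⟨rfl, hg⟩ | ⟨rfl, hg⟩ | ⟨rfl, hg⟩ <;>
              rw [pvG_eq] at hg <;> first | omega | exact absurd hg h0 | exact absurd hg h1)
        have hv : List.foldl min 5 (pvHits u.toList) = 2 :=
          le_antisymm (pv_fold_min_le _ 5 2 hmem) hge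
        rw [if_neg h0, if_neg h1, if_pos h2, hv]; rfl
      · by_cases h3 : (["helmet", "protection"].any (fun word => PySem.Str.isIn word u)) = true
        · have hb : PySem.Chars.isIn "helmet".toList u.toList = true ∨
              PySem.Chars.isIn "protection".toList u.toList = true := by
            simpa [PySem.Str.isIn_eq] using h3
          have hmem : (3 : Nat) ∈ pvHits u.toList := by
            rcases hb with h | h
            · exact pv_isIn_mem u.toList "helmet" 3 (by simp [pvKwRank]) (by simp) h
            · exact pv_isIn_mem u.toList "protection" 3 (by simp [pvKwRank]) (by simp) h
          have hge : 3 ≤ List.foldl min 5 (pvHits u.toList) :=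
            pv_le_fold_min _ 5 3 (by omega) (fun x hx => by
              rcases pv_mem_hits u.toList x hx with ⟨rfl, hg⟩ | ⟨rfl, hg⟩ | ⟨rfl, hg⟩ | ⟨rfl, hg⟩ | ⟨rfl, hg⟩ <;>
                rw [pvG_eq] at hg <;> first | omega | exact absurd hg h0 | exact absurd hg h1 | exact absurd hg h2)
          have hv : List.foldl min 5 (pvHits u.toList) = 3 :=
            le_antisymm (pv_fold_min_le _ 5 3 hmem) hge
          rw [if_neg h0, if_neg h1, if_neg h2, if_pos h3, hv]; rfl
        · by_cases h4 : (["tire", "wheel", "brake", "battery", "motor", "controller"].any (fun word => PySem.Str.isIn word u)) = true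
          · have hb : PySem.Chars.isIn "tire".toList u.toList = true ∨
                PySem.Chars.isIn "wheel".toList u.toList = true ∨
                PySem.Chars.isIn "brake".toList u.toList = true ∨
                PySem.Chars.isIn "battery".toList u.toList = true ∨
                PySem.Chars.isIn "motor".toList u.toList = true ∨
                PySem.Chars.isIn "controller".toList u.toList = true := by
              simpa [PySem.Str.isIn_eq] using h4
            have hmem : (4 : Nat) ∈ pvHits u.toList := by
              rcases hb with h | h | h | h | h | h
              · exact pv_isIn_mem u.toList "tire" 4 (by simp [pvKwRank]) (by simp) h
              · exact pv_isIn_mem u.toList "wheel" 4 (by simp [pvKwRank]) (by simp) h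
              · exact pv_isIn_mem u.toList "brake" 4 (by simp [pvKwRank]) (by simp) h
              · exact pv_isIn_mem u.toList "battery" 4 (by simp [pvKwRank]) (by simp) h
              · exact pv_isIn_mem u.toList "motor" 4 (by simp [pvKwRank]) (by simp) h
              · exact pv_isIn_mem u.toList "controller" 4 (by simp [pvKwRank]) (by simp) h
            have hge : 4 ≤ List.foldl min 5 (pvHits u.toList) :=
              pv_le_fold_min _ 5 4 (by omega) (fun x hx => by
                rcases pv_mem_hits u.toList x hx with ⟨rfl, hg⟩ | ⟨rfl, hg⟩ | ⟨rfl, hg⟩ | ⟨rfl, hg⟩ | ⟨rfl, hg⟩ <;>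
                  rw [pvG_eq] at hg <;> first | omega | exact absurd hg h0 | exact absurd hg h1 | exact absurd hg h2 | exact absurd hg h3)
            have hv : List.foldl min 5 (pvHits u.toList) = 4 :=
              le_antisymm (pv_fold_min_le _ 5 4 hmem) hge
            rw [if_neg h0, if_neg h1, if_neg h2, if_neg h3, if_pos h4, hv]; rfl
          · have hge : 5 ≤ List.foldl min 5 (pvHits u.toList) :=
              pv_le_fold_min _ 5 5 (by omega) (fun x hx => by
                rcases pv_mem_hits u.toList x hx with ⟨rfl, hg⟩ | ⟨rfl, hg⟩ | ⟨rfl, hg⟩ | ⟨rfl, hg⟩ | ⟨rfl, hg⟩ <;>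
                  rw [pvG_eq] at hg <;> first | exact absurd hg h0 | exact absurd hg h1 | exact absurd hg h2 | exact absurd hg h3 | exact absurd hg h4)
            have hv : List.foldl min 5 (pvHits u.toList) = 5 :=
              le_antisymm (pv_fold_min_le_init _ 5) hge
            rw [if_neg h0, if_neg h1, if_neg h2, if_neg h3, if_neg h4, hv]; rfl

-- ===== VERDICT (by name: the statement is the Claim_ definition above) =====
theorem determine_product_category_py_spec : Claim_equal_determine_product_category_py := by
  intro p _
  unfold Spec_determine_product_category_py
  rw [pv_alt_eq, pv_A_eq]
  exact pv_key (PySem.Str.lower p)
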